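-- pv_equiv track=rewrite | github.com/kinstaky/attpc_estimator | src/attpc_estimator/process/relabel.py | _label_transition_ratio
-- ===== SOURCE A (Python) =====
-- def _label_transition_ratio(
--     old_labels: list[str],
--     new_labels: list[str],
--     source_label: str,
--     target_label: str,
-- ) -> tuple[int, int]:
--     numerator = 0
--     denominator = 0
--     for old_label, new_label in zip(old_labels, new_labels, strict=True):
--         if old_label != source_label:
--             continue
--         denominator += 1
--         if new_label == target_label:
--             numerator += 1
--     return numerator, denominator
-- ===== SOURCE B (Python) =====
-- def _label_transition_ratio(
--     old_labels: list[str],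
--     new_labels: list[str],
--     source_label: str,
--     target_label: str,
-- ) -> tuple[int, int]:
--     counts = {}
--     for pair in zip(old_labels, new_labels, strict=True):
--         counts[pair] = counts.get(pair, 0) + 1
--     numerator = counts.get((source_label, target_label), 0)
--     denominator = sum(v for (o, _), v in counts.items() if o == source_label)
--     return numerator, denominator
-- ===== Notes on version B (the rewrite author's own statement) =====
-- stated objective: alternative
-- what changed: Replaces A's single branching accumulation loop with a build-an-index-then-aggregate strategy: a frequency dict of the zipped (old,new) pairs is built first, then numerator is one dict lookup and denominator a sum of the dict's counts grouped by source label.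
import Mathlib
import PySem

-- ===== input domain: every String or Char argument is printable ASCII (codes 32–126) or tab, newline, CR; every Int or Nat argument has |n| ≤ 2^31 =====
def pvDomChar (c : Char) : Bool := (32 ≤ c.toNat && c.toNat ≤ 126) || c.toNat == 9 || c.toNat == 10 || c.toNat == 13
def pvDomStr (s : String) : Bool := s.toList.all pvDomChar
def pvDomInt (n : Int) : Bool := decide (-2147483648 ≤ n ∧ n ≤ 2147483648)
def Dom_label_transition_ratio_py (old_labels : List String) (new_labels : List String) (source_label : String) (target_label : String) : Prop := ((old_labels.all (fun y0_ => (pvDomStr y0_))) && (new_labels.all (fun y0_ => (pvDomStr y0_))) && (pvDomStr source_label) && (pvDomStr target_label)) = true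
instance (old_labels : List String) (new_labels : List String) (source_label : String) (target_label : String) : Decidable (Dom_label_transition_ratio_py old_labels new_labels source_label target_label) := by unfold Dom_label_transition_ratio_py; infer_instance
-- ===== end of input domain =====

-- B replaces A's branching accumulator loop with a build-an-index-then-aggregate strategy: a frequency dict of the
-- zipped pairs is built once, then numerator is a single lookup and denominator a sum over the dict's groups
-- (alternative decomposition, same O(n) cost).

-- ===== PORT A =====
-- literal port of A: fold over the strict-zipped pairs, branching accumulator (numerator, denominator)
def label_transition_ratio_py (old_labels : List String) (new_labels : List String) (source_label : String) (target_label : String) : Int × Int :=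
  (old_labels.zip new_labels).foldl
    (fun acc p =>
      if p.1 ≠ source_label then acc
      else ((if p.2 = target_label then acc.1 + 1 else acc.1), acc.2 + 1))
    (0, 0)

-- ===== PORT B =====
-- port of B: build the pair-frequency dict, then lookup + aggregate over its items
def label_transition_ratio_py_alt (old_labels : List String) (new_labels : List String) (source_label : String) (target_label : String) : Int × Int :=
  let counts : PySem.Dict (String × String) Int :=
    (old_labels.zip new_labels).foldl (fun d p => d.insert p (d.getD p 0 + 1)) PySem.Dict.empty
  let numerator := counts.getD (source_label, target_label) 0
  let denominator := ((counts.items.filter (fun it => it.1.1 == source_label)).map (fun it => it.2)).sum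
  (numerator, denominator)

-- ===== PRECONDITION & SPEC =====
-- zip(..., strict=True) raises ValueError when the lists have different lengths; Pre_ excludes exactly that
def Pre_label_transition_ratio_py (old_labels : List String) (new_labels : List String) (source_label : String) (target_label : String) : Prop := old_labels.length = new_labels.length
instance (old_labels : List String) (new_labels : List String) (source_label : String) (target_label : String) : Decidable (Pre_label_transition_ratio_py old_labels new_labels source_label target_label) := by unfold Pre_label_transition_ratio_py; infer_instance
def pvWitness_label_transition_ratio_py : List String × List String × String × String := (["a", "b", "a"], ["b", "b", "a"], "a", "b")
def Spec_label_transition_ratio_py (old_labels : List String) (new_labels : List String) (source_label : String) (target_label : String) (out : Int × Int) : Prop := out = label_transition_ratio_py_alt old_labels new_labels source_label target_label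
instance (old_labels : List String) (new_labels : List String) (source_label : String) (target_label : String) (out : Int × Int) : Decidable (Spec_label_transition_ratio_py old_labels new_labels source_label target_label out) := by unfold Spec_label_transition_ratio_py; infer_instance

-- ===== CLAIM =====
def Claim_equal_label_transition_ratio_py : Prop := ∀ (old_labels : List String) (new_labels : List String) (source_label : String) (target_label : String), Dom_label_transition_ratio_py old_labels new_labels source_label target_label → Pre_label_transition_ratio_py old_labels new_labels source_label target_label → Spec_label_transition_ratio_py old_labels new_labels source_label target_label (label_transition_ratio_py old_labels new_labels source_label target_label)

-- ===== LEMMAS AND PROOFS =====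
-- loop invariant: A's fold starting from (a, b) adds the pair-count and the source-count
theorem lt_fold_eq (source_label target_label : String) :
    ∀ (old_labels new_labels : List String), old_labels.length = new_labels.length →
    ∀ (a b : Int),
    (old_labels.zip new_labels).foldl
      (fun acc p =>
        if p.1 ≠ source_label then acc
        else ((if p.2 = target_label then acc.1 + 1 else acc.1), acc.2 + 1))
      (a, b)
    = (a + ((old_labels.zip new_labels).count (source_label, target_label) : Int),
       b + (old_labels.count source_label : Int)) := by
  intro old_labels
  induction old_labels with
  | nil => intro new_labels h a b; simp [List.zip]
  | cons o os ih =>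
    intro new_labels h a b
    cases new_labels with
    | nil => simp at h
    | cons m ms =>
      simp only [List.zip_cons_cons, List.foldl_cons]
      by_cases ho : o = source_label
      · by_cases hm : m = target_label
        · simp only [ho, hm, ne_eq, not_true_eq_false, if_false]
          rw [ih ms (by simpa using h)]
          rw [Prod.ext_iff]
          constructor <;> simp [hm] <;> push_cast <;> ring
        · simp only [ho, ne_eq, not_true_eq_false, if_false, if_neg hm]
          rw [ih ms (by simpa using h)]
          rw [Prod.ext_iff]
          constructor <;> simp [List.count_cons, hm] <;> push_cast <;> ring
      · simp only [ne_eq, if_pos ho]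
        rw [ih ms (by simpa using h)]
        rw [Prod.ext_iff]
        constructor <;> simp [List.count_cons, ho]

-- List.count does not depend on which (lawful) BEq instance is used
theorem pv_count_irrel {α : Type} (i1 i2 : BEq α) (h1 : @LawfulBEq α i1) (h2 : @LawfulBEq α i2) (k : α) (l : List α) : @List.count α i1 k l = @List.count α i2 k l := by
  cases @lawful_beq_subsingleton α i1 i2 h1 h2; rfl

-- the group aggregation in B: summing the counter's values over keys whose first component is s
-- counts exactly the pairs whose first component is s
theorem lt_group_sum (pairs : List (String × String)) (s : String) :
    ((((PySem.Set.ofList pairs).filter (fun k => k.1 == s)).map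
        (fun k => ((pairs.count k : Nat) : Int))).sum)
    = ((pairs.countP (fun k => k.1 == s) : Nat) : Int) := by
  have hperm : (PySem.Set.ofList pairs).Perm pairs.dedup :=
    (List.perm_ext_iff_of_nodup (PySem.Set.nodup_ofList pairs) pairs.nodup_dedup).mpr
      (by intro a; rw [PySem.Set.mem_ofList, List.mem_dedup])
  rw [((hperm.filter (fun k => k.1 == s)).map (fun k => ((pairs.count k : Nat) : Int))).sum_eq,
      ← List.sum_map_count_dedup_filter_eq_countP (fun k : String × String => k.1 == s) pairs,
      Nat.cast_list_sum, List.map_map]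
  refine congrArg List.sum (List.map_congr_left (fun k _ => ?_))
  simp only [Function.comp_apply]
  exact congrArg Nat.cast (pv_count_irrel _ _ inferInstance inferInstance k pairs)

-- B's port computes the same pair as A's characterisation, on equal-length lists
theorem lt_alt_eq (old_labels new_labels : List String) (s t : String)
    (h : old_labels.length = new_labels.length) :
    label_transition_ratio_py_alt old_labels new_labels s t
    = (((old_labels.zip new_labels).count (s, t) : Int),
       (old_labels.count s : Int)) := by
  unfold label_transition_ratio_py_alt
  rw [PySem.Dict.foldl_insert_getD_add_one_eq_counter]
  rw [Prod.ext_iff]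
  refine ⟨PySem.Dict.getD_counter _ _, ?_⟩
  simp only [PySem.Dict.items_counter, List.filter_map, List.map_map]
  -- the filter-of-map reduces definitionally to a filter on keys; apply the group-sum lemma
  show ((((PySem.Set.ofList (old_labels.zip new_labels)).filter (fun k => k.1 == s)).map
      (fun k => (((old_labels.zip new_labels).count k : Nat) : Int))).sum) = _
  rw [lt_group_sum]
  have hcnt : (old_labels.zip new_labels).countP (fun k => k.1 == s) = old_labels.count s :=
    calc (old_labels.zip new_labels).countP (fun k => k.1 == s)
        = ((old_labels.zip new_labels).map Prod.fst).countP (fun x => x == s) :=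
          (@List.countP_map _ _ (fun x => x == s) Prod.fst _).symm
      _ = old_labels.countP (fun x => x == s) := by rw [List.map_fst_zip (le_of_eq h)]
      _ = old_labels.count s := rfl
  rw [hcnt]

-- ===== VERDICT =====
theorem label_transition_ratio_py_spec : Claim_equal_label_transition_ratio_py := by
  intro old_labels new_labels source_label target_label _ hpre
  unfold Spec_label_transition_ratio_py label_transition_ratio_py
  rw [lt_fold_eq source_label target_label old_labels new_labels hpre 0 0,
      lt_alt_eq old_labels new_labels source_label target_label hpre]
  simp
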